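-- pv_equiv track=rewrite | github.com/JaycgbEDC/Python | 苏大/本科习题/3.1_2017.py | findMultiAlphaWords
-- ===== SOURCE A (Python) =====
-- def findMultiAlphaWords(l, num):
--     res = []
--     for i in l:
--         temp = i.lower()
--         for j in temp:
--             if temp.count(j) >= num:
--                 res.append(i)
--                 break
--     return res
-- ===== SOURCE B (Python) =====
-- def findMultiAlphaWords(l, num):
--     return [w for w in l if _has_run(sorted(w.lower()), num)]
--
-- def _has_run(s, num):
--     run = 0
--     prev = None
--     for c in s:
--         run = run + 1 if c == prev else 1
--         prev = c
--         if run >= num: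
--             return True
--     return False
-- ===== Notes on version B (the rewrite author's own statement) =====
-- stated objective: alternative
-- what changed: Replaces A's per-character count() rescans with sorting each lowered word and a single pass that tracks the length of the current run of equal characters.
import Mathlib
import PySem

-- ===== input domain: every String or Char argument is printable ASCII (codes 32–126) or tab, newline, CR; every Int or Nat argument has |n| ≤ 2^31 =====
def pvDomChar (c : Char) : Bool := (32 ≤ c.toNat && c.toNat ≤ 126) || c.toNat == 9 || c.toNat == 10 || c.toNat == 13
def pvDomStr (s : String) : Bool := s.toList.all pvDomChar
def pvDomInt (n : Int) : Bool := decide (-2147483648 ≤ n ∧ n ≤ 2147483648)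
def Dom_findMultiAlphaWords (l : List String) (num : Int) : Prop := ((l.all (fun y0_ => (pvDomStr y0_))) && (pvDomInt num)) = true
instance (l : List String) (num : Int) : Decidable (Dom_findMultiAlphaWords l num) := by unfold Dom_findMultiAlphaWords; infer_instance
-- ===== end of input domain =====

-- B sorts each lowered word and scans for a run of equal characters instead of A's per-character count() rescans.

-- ===== PORT A =====
-- inner 'for j in temp: if temp.count(j) >= num: append; break' — the break makes it a
-- find-first over temp; temp.count(j) for a single char j is exactly List.count.
def pvAFind (temp : List Char) (rest : List Char) (num : Int) : Bool :=
  match rest with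
  | [] => false
  | j :: rs => if num ≤ (temp.count j : Int) then true else pvAFind temp rs num

def findMultiAlphaWords (l : List String) (num : Int) : List String :=
  l.foldl (fun res i =>
    let temp := PySem.Chars.lower i.toList
    if pvAFind temp temp num then res ++ [i] else res) []

-- ===== PORT B =====
-- single pass over the sorted lowered word, tracking the current run length (Source B's _has_run)
def pvRunScan (s : List Char) (run : Int) (prev : Option Char) (num : Int) : Bool :=
  match s with
  | [] => false
  | c :: rs =>
    let run' := if prev = some c then run + 1 else 1
    if num ≤ run' then true else pvRunScan rs run' (some c) num

def pvHasRun (s : List Char) (num : Int) : Bool := pvRunScan s 0 none num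

def findMultiAlphaWords_alt (l : List String) (num : Int) : List String :=
  l.filter (fun w => pvHasRun (PySem.List.sorted (PySem.Chars.lower w.toList) (fun x => x) false) num)

-- ===== PRECONDITION & SPEC =====
def Spec_findMultiAlphaWords (l : List String) (num : Int) (out : List String) : Prop := out = findMultiAlphaWords_alt l num
instance (l : List String) (num : Int) (out : List String) : Decidable (Spec_findMultiAlphaWords l num out) := by unfold Spec_findMultiAlphaWords; infer_instance

-- ===== CLAIM (what is proved, stated in full; the proofs are below) =====
def Claim_equal_findMultiAlphaWords : Prop := ∀ (l : List String) (num : Int), Dom_findMultiAlphaWords l num → Spec_findMultiAlphaWords l num (findMultiAlphaWords l num)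

-- ===== LEMMAS AND PROOFS =====

lemma pvAFind_iff (temp : List Char) (num : Int) (rest : List Char) :
    pvAFind temp rest num = true ↔ ∃ j ∈ rest, num ≤ (temp.count j : Int) := by
  induction rest with
  | nil => simp [pvAFind]
  | cons j rs ih =>
    simp only [pvAFind]
    split_ifs with h
    · simp [h]
    · simp [ih, h]

lemma pvRunScan_cons (c : Char) (rs : List Char) (run : Int) (prev : Option Char) (num : Int) :
    pvRunScan (c :: rs) run prev num =
      (if num ≤ (if prev = some c then run + 1 else 1) then true
       else pvRunScan rs (if prev = some c then run + 1 else 1) (some c) num) := rfl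

lemma pvRunScan_iff (num : Int) (s : List Char) :
    ∀ (run : Int) (prev : Option Char),
      s.Pairwise (· ≤ ·) → (∀ p, prev = some p → ∀ x ∈ s, p ≤ x) →
      (pvRunScan s run prev num = true ↔
        ∃ j ∈ s, num ≤ (s.count j : Int) + (if prev = some j then run else 0)) := by
  induction s with
  | nil => intro run prev _ _; simp [pvRunScan]
  | cons c rs ih =>
    intro run prev hsorted hprev
    have hcr : ∀ x ∈ rs, c ≤ x := (List.pairwise_cons.mp hsorted).1
    have hrs : rs.Pairwise (· ≤ ·) := (List.pairwise_cons.mp hsorted).2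
    have hcc : (c :: rs).count c = rs.count c + 1 := by simp
    rw [pvRunScan_cons]
    by_cases h : num ≤ (if prev = some c then run + 1 else 1)
    · rw [if_pos h]
      constructor
      · intro _
        refine ⟨c, List.mem_cons_self, ?_⟩
        by_cases hp : prev = some c
        · rw [if_pos hp] at h ⊢; rw [hcc]; omega
        · rw [if_neg hp] at h ⊢; rw [hcc]; omega
      · intro _; rfl
    · rw [if_neg h,
        ih _ (some c) hrs (fun p hp x hx => by cases hp; exact hcr x hx)]
      constructor
      · rintro ⟨j, hj, hle⟩
        by_cases hjc : j = c
        · subst hjc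
          rw [if_pos rfl] at hle
          refine ⟨j, List.mem_cons_self, ?_⟩
          rw [hcc]
          by_cases hp : prev = some j
          · rw [if_pos hp] at hle ⊢; omega
          · rw [if_neg hp] at hle ⊢; omega
        · have hcj : ¬ (some c = some j) := by
            simp only [Option.some.injEq]
            exact fun h' => hjc h'.symm
          rw [if_neg hcj] at hle
          have hpj : prev ≠ some j := fun hp =>
            hjc (le_antisymm (hprev j hp c List.mem_cons_self) (hcr j hj))
          have hcnt : (c :: rs).count j = rs.count j := List.count_cons_of_ne (fun h' => hjc h'.symm)
          exact ⟨j, List.mem_cons_of_mem c hj, by rw [hcnt, if_neg hpj]; omega⟩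
      · rintro ⟨j, hj, hle⟩
        by_cases hjc : j = c
        · subst hjc
          have hjrs : j ∈ rs := by
            by_contra hnot
            have h0 : rs.count j = 0 := List.count_eq_zero.mpr hnot
            rw [hcc] at hle
            by_cases hp : prev = some j
            · rw [if_pos hp] at hle h; omega
            · rw [if_neg hp] at hle h; omega
          refine ⟨j, hjrs, ?_⟩
          rw [if_pos rfl]
          rw [hcc] at hle
          by_cases hp : prev = some j
          · rw [if_pos hp] at hle h ⊢; omega
          · rw [if_neg hp] at hle h ⊢; omega
        · have hjrs : j ∈ rs := by
            rcases List.mem_cons.mp hj with h' | h'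
            · exact absurd h' hjc
            · exact h'
          have hcj : ¬ (some c = some j) := by
            simp only [Option.some.injEq]
            exact fun h' => hjc h'.symm
          have hpj : prev ≠ some j := fun hp =>
            hjc (le_antisymm (hprev j hp c List.mem_cons_self) (hcr j hjrs))
          rw [if_neg hpj] at hle
          have hcnt : (c :: rs).count j = rs.count j := List.count_cons_of_ne (fun h' => hjc h'.symm)
          rw [hcnt] at hle
          exact ⟨j, hjrs, by rw [if_neg hcj]; omega⟩

lemma pvHasRun_sorted_iff (cs : List Char) (num : Int) :
    pvHasRun (PySem.List.sorted cs (fun x => x) false) num = true ↔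
      ∃ j ∈ cs, num ≤ (cs.count j : Int) := by
  have hperm : (PySem.List.sorted cs (fun x => x) false).Perm cs := PySem.List.sorted_perm cs _ _
  have hsorted : (PySem.List.sorted cs (fun x => x) false).Pairwise (· ≤ ·) :=
    PySem.List.sorted_pairwise cs (fun x => x)
  unfold pvHasRun
  rw [pvRunScan_iff num _ 0 none hsorted (by intro p hp; cases hp)]
  constructor
  · rintro ⟨j, hj, hle⟩
    exact ⟨j, hperm.mem_iff.mp hj, by simpa [hperm.count_eq] using hle⟩
  · rintro ⟨j, hj, hle⟩
    exact ⟨j, hperm.mem_iff.mpr hj, by simpa [hperm.count_eq]⟩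

lemma pvPerWord (w : String) (num : Int) :
    pvAFind (PySem.Chars.lower w.toList) (PySem.Chars.lower w.toList) num =
      pvHasRun (PySem.List.sorted (PySem.Chars.lower w.toList) (fun x => x) false) num := by
  set temp := PySem.Chars.lower w.toList
  rcases hb : pvHasRun (PySem.List.sorted temp (fun x => x) false) num with _ | _
  · rcases ha : pvAFind temp temp num with _ | _
    · rfl
    · exact absurd ((pvHasRun_sorted_iff temp num).mpr ((pvAFind_iff temp num temp).mp ha)) (by simp [hb])
  · exact (pvAFind_iff temp num temp).mpr ((pvHasRun_sorted_iff temp num).mp hb)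

-- ===== VERDICT (by name: the statement is the Claim_ definition above) =====
theorem findMultiAlphaWords_spec : Claim_equal_findMultiAlphaWords := by
  intro l num _
  unfold Spec_findMultiAlphaWords findMultiAlphaWords findMultiAlphaWords_alt
  have h := PySem.List.foldl_append_if_eq_filter
    (fun i => pvAFind (PySem.Chars.lower i.toList) (PySem.Chars.lower i.toList) num) (l := l) (acc := [])
  simp only [h, List.nil_append]
  exact List.filter_congr (fun w _ => pvPerWord w num)
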